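-- pv_equiv track=rewrite | github.com/WojciechMula/toys | avx512-bfs/gen.py | bitswap
-- ===== SOURCE A (Python) =====
-- def bitswap(x):
--     assert x < 128
--
--     res = 0
--     for src in range(7):
--         dst = 7 - src
--         bit = int(bool(x & (1 << src)))
--         res |= bit << dst
--
--     return res
-- ===== SOURCE B (Python) =====
-- def bitswap(x):
--     assert x < 128
--     return int(format(x & 0x7F, '07b')[::-1], 2) << 1
-- ===== Notes on version B (the rewrite author's own statement) =====
-- stated objective: idiomatic
-- what changed: replaces the 7-iteration bit loop with a one-line mask / format-to-7-bit-binary-string / reverse / int-parse / shift pipeline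
import Mathlib
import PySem

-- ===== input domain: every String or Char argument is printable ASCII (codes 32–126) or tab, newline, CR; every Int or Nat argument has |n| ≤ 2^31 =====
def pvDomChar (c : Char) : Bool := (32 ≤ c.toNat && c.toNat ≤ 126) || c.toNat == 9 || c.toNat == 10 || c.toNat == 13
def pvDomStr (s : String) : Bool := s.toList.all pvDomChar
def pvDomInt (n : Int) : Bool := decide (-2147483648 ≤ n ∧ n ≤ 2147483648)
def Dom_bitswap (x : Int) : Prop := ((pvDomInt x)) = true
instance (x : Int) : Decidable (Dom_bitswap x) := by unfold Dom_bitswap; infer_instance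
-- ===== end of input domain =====

-- B replaces A's per-bit loop by mask / format-to-7-bit-binary / reverse / parse-base-2 / shift-left-1 (idiomatic one-liner, same cost).

-- ===== PORT A =====
def bitswap (x : Int) : Int :=
  -- res = 0; for src in range(7): dst = 7 - src; bit = int(bool(x & (1 << src))); res |= bit << dst
  (PySem.List.pyRange 0 7 1).foldl (fun (res : Int) (src : Int) =>
    let dst : Int := 7 - src
    let bit : Int := if PySem.Int.band x ((1 : Int) <<< src.toNat) ≠ 0 then 1 else 0
    PySem.Int.bor res (bit <<< dst.toNat)) 0

-- ===== PORT B =====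
def bitswap_alt (x : Int) : Int :=
  let v := PySem.Int.band x 127                            -- x & 0x7F
  let s := PySem.Chars.zfill (PySem.Int.toBinChars v) 7    -- format(v, '07b')  (v ≥ 0, so zero-padding = format's)
  let r := s.reverse                                       -- [::-1]
  ((PySem.Int.ofCharsBase? r 2).getD 0) <<< 1              -- int(r, 2) << 1  (never none: r is nonempty binary digits)

-- ===== PRECONDITION & SPEC =====
-- A's `assert x < 128` raises AssertionError on x ≥ 128; exactly those inputs are excluded.
def Pre_bitswap (x : Int) : Prop := x < 128
instance (x : Int) : Decidable (Pre_bitswap x) := by unfold Pre_bitswap; infer_instance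
def pvWitness_bitswap : Int := 5
def Spec_bitswap (x : Int) (out : Int) : Prop := out = bitswap_alt x
instance (x : Int) (out : Int) : Decidable (Spec_bitswap x out) := by unfold Spec_bitswap; infer_instance

-- ===== CLAIM (what is proved, stated in full; the proofs are below) =====
def Claim_equal_bitswap : Prop := ∀ (x : Int), Dom_bitswap x → Pre_bitswap x → Spec_bitswap x (bitswap x)

-- ===== LEMMAS AND PROOFS =====

-- low 7 bits of a Nat see only a % 128
theorem pv_natKey (a m : Nat) (h : m < 128) : a &&& m = a % 128 &&& m := by
  apply Nat.eq_of_testBit_eq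
  intro i
  rcases lt_or_ge i 7 with hi | hi
  · rw [Nat.testBit_and, Nat.testBit_and, show (128 : Nat) = 2 ^ 7 from rfl,
        Nat.testBit_mod_two_pow]
    simp [hi]
  · have hm : m.testBit i = false := by
      apply Nat.testBit_lt_two_pow
      calc m < 128 := h
        _ = 2 ^ 7 := rfl
        _ ≤ 2 ^ i := Nat.pow_le_pow_right (by norm_num) hi
    simp [Nat.testBit_and, hm]

-- complement identity on 7-bit values
set_option maxRecDepth 8192 in
theorem pv_L0 : ∀ p q : Fin 128, p.val - (p.val &&& q.val) = (127 - q.val) &&& p.val := by decide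

theorem pv_and127 : ∀ p : Fin 128, p.val &&& 127 = p.val := by decide

-- Python & against a small nonnegative mask sees only x % 128
theorem pv_IntKey (x : Int) (m : Nat) (h : m < 128) :
    PySem.Int.band x (m : Int) = (((x % 128).toNat &&& m : Nat) : Int) := by
  unfold PySem.Int.band
  have hm0 : (0 : Int) ≤ (m : Int) := Int.natCast_nonneg m
  by_cases hx : (0 : Int) ≤ x
  · rw [if_pos hx, if_pos hm0, Int.toNat_natCast]
    have ht : (x % 128).toNat = x.toNat % 128 := by omega
    rw [ht, ← pv_natKey x.toNat m h]
  · rw [if_neg hx, if_pos hm0, Int.toNat_natCast]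
    set n := (-x - 1).toNat with hn
    have hxn : x = -(n : Int) - 1 := by omega
    have ht : (x % 128).toNat = 127 - n % 128 := by omega
    have hmod : m &&& n = m &&& (n % 128) := by
      rw [Nat.and_comm m n, pv_natKey n m h, Nat.and_comm]
    rw [ht, hmod]
    have := pv_L0 ⟨m, h⟩ ⟨n % 128, Nat.mod_lt _ (by norm_num)⟩
    simp only at this
    rw [this]

theorem pv_pyRange7 : PySem.List.pyRange 0 7 1 = [0, 1, 2, 3, 4, 5, 6] := by decide

-- the mask 1 << s (s = 0..6) sees only x % 128
theorem pv_mask (x : Int) (s : Int) (h0 : 0 ≤ s) (h7 : s < 7) :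
    PySem.Int.band x ((1 : Int) <<< s.toNat) =
      PySem.Int.band (((x % 128).toNat : Nat) : Int) ((1 : Int) <<< s.toNat) := by
  have hk : s.toNat ≤ 6 := by omega
  have hsh : ((1 : Int) <<< s.toNat) = ((2 ^ s.toNat : Nat) : Int) := by
    rw [Int.shiftLeft_eq]; push_cast; ring
  have hlt : 2 ^ s.toNat < 128 := by
    calc 2 ^ s.toNat ≤ 2 ^ 6 := Nat.pow_le_pow_right (by norm_num) hk
      _ < 128 := by norm_num
  rw [hsh, pv_IntKey x _ hlt, pv_IntKey _ _ hlt]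
  have hr : ((((x % 128).toNat : Nat) : Int) % 128).toNat = (x % 128).toNat := by omega
  rw [hr]

theorem pv_band127 (x : Int) : PySem.Int.band x 127 = (((x % 128).toNat : Nat) : Int) := by
  have h : (127 : Int) = ((127 : Nat) : Int) := by norm_num
  rw [h, pv_IntKey x 127 (by norm_num)]
  have : (x % 128).toNat &&& 127 = (x % 128).toNat :=
    pv_and127 ⟨(x % 128).toNat, by omega⟩
  rw [this]

set_option maxRecDepth 100000 in
set_option maxHeartbeats 1000000 in
theorem pv_fin : ∀ r : Fin 128, bitswap ((r.val : Nat) : Int) = bitswap_alt ((r.val : Nat) : Int) := by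
  decide

theorem pv_eq (x : Int) : bitswap x = bitswap_alt x := by
  set r : Nat := (x % 128).toNat with hrdef
  have hrlt : r < 128 := by omega
  have h1 : bitswap x = bitswap ((r : Nat) : Int) := by
    simp only [bitswap, pv_pyRange7, List.foldl]
    rw [pv_mask x 0 (by norm_num) (by norm_num), pv_mask x 1 (by norm_num) (by norm_num),
        pv_mask x 2 (by norm_num) (by norm_num), pv_mask x 3 (by norm_num) (by norm_num),
        pv_mask x 4 (by norm_num) (by norm_num), pv_mask x 5 (by norm_num) (by norm_num),
        pv_mask x 6 (by norm_num) (by norm_num)]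
  have h2 : bitswap_alt x = bitswap_alt ((r : Nat) : Int) := by
    simp only [bitswap_alt]
    rw [pv_band127 x, pv_band127 ((r : Nat) : Int)]
    have hrr : ((((r : Nat) : Int) % 128).toNat : Nat) = r := by omega
    rw [hrr]
  rw [h1, h2]
  exact pv_fin ⟨r, hrlt⟩

-- ===== VERDICT (by name: the statement is the Claim_ definition above) =====
theorem bitswap_spec : Claim_equal_bitswap := by
  intro x _ _
  show bitswap x = bitswap_alt x
  exact pv_eq x
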